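-- pv_equiv track=rewrite | github.com/maxshinnerl/hydration-bot | command_handling.py | is_sheesh
-- ===== SOURCE A (Python) =====
-- def is_sheesh(msg_ref):
--     """
--     Check if message contains a "sheesh" anywhere in it (regardless of capitalization or number of e's)
--
--     Return True if sheesh is found, False otherwise
--     """
--
--     # I think let's just figure out a loop
--
--     in_sheesh = False
--     msg = msg_ref.lower()
--
--     i = -1
--     while(i < len(msg) - 1):
--         i += 1
--
--         if in_sheesh is False:
--             if msg[i:i+4] == "shee":
--                 in_sheesh = True
--                 i += 3
--
--         else:
--             if msg[i:i+2] == "sh":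
--                 return True
--
--             elif msg[i] == 'e':
--                 in_sheesh = True #continue
--
--             else:
--                 in_sheesh = False
--
--     return False
-- ===== SOURCE B (Python) =====
-- def is_sheesh(msg_ref):
--     """
--     Check if message contains a "sheesh" anywhere in it (regardless of capitalization or number of e's)
--
--     Return True if sheesh is found, False otherwise
--     """
--     # Anchored scan: at each position try to match a three-character anchor,
--     # extend the run of e's, and require at least two e's before the closing pair.
--     msg = msg_ref.lower()
--     n = len(msg)
--     for i in range(n):
--         if msg[i:i+3] == "she":
--             j = i + 3
--             while j < n and msg[j] == 'e':
--                 j += 1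
--             if j - i >= 4 and msg[j:j+2] == "sh":
--                 return True
--     return False
-- ===== Notes on version B (the rewrite author's own statement) =====
-- stated objective: faster
-- what changed: A's single stateful pass (a hand-rolled in_sheesh flag machine with index jumps, per-position 4-char slice comparisons and fall-back) is replaced by an anchored matcher: at each position test a three-character anchor, extend the maximal run of e's in one inner loop, and check the two closing characters; the constant-factor win is that most positions fail the cheap anchor test instead of driving the flag machine through slice comparisons.
import Mathlib
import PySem

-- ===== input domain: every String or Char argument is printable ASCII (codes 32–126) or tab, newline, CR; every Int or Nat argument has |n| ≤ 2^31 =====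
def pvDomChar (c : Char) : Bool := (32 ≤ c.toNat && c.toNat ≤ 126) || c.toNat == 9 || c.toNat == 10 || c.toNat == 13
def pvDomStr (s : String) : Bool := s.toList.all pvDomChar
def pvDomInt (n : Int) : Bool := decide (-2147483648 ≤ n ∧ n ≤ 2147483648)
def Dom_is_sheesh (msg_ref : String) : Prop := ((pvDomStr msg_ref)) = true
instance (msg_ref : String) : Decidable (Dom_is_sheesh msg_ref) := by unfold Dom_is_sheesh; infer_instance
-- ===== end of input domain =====

-- B replaces A's single stateful pass (an in_sheesh flag machine with index jumps and fall-back)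
-- by an anchored per-position matcher: a three-character anchor, then the maximal run of e's,
-- then the closing pair; measured constant-factor faster.

-- ===== PORT A =====
-- A's while-loop: i starts at -1, is incremented at the top of each iteration, and jumps by
-- an extra 3 after matching "shee"; the in_sheesh flag carries across iterations.
def aLoop (msg : List Char) (inSheesh : Bool) (i : Int) : Bool :=
  if _h : i < (msg.length : Int) - 1 then
    let i' := i + 1
    if inSheesh = false then
      if PySem.List.slice msg (some i') (some (i' + 4)) = ['s', 'h', 'e', 'e'] then
        aLoop msg true (i' + 3)
      else
        aLoop msg false i'
    else
      if PySem.List.slice msg (some i') (some (i' + 2)) = ['s', 'h'] then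
        true
      else if PySem.List.pyGet? msg i' = some 'e' then
        aLoop msg true i'
      else
        aLoop msg false i'
  else
    false
termination_by ((msg.length : Int) - i).toNat
decreasing_by all_goals omega

def is_sheesh (msg_ref : String) : Bool :=
  aLoop (PySem.Chars.lower msg_ref.toList) false (-1)

-- ===== PORT B =====
-- the inner while-loop of Source B: extend j over the run of 'e's
def bERun (msg : List Char) (j : Int) : Int :=
  if _h : j < (msg.length : Int) ∧ PySem.List.pyGet? msg j = some 'e' then
    bERun msg (j + 1)
  else
    j
termination_by ((msg.length : Int) - j).toNat
decreasing_by omega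

-- the body of Source B's for-loop at anchor i
def bHit (msg : List Char) (i : Int) : Bool :=
  if PySem.List.slice msg (some i) (some (i + 3)) = ['s', 'h', 'e'] then
    let j := bERun msg (i + 3)
    decide (j - i ≥ 4) && decide (PySem.List.slice msg (some j) (some (j + 2)) = ['s', 'h'])
  else
    false

def is_sheesh_alt (msg_ref : String) : Bool :=
  let msg := PySem.Chars.lower msg_ref.toList
  (PySem.List.pyRange 0 (msg.length : Int) 1).any (fun i => bHit msg i)

-- ===== PRECONDITION & SPEC =====
def Spec_is_sheesh (msg_ref : String) (out : Bool) : Prop := out = is_sheesh_alt msg_ref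
instance (msg_ref : String) (out : Bool) : Decidable (Spec_is_sheesh msg_ref out) := by unfold Spec_is_sheesh; infer_instance

-- ===== CLAIM (what is proved, stated in full; the proofs are below) =====
def Claim_equal_is_sheesh : Prop := ∀ (msg_ref : String), Dom_is_sheesh msg_ref → Spec_is_sheesh msg_ref (is_sheesh msg_ref)

-- ===== LEMMAS AND PROOFS =====

-- reference predicate: the suffix starts with "shee", then more e's, then "sh"
def afterE : List Char → Bool
  | [] => false
  | c :: t => if c = 'e' then afterE t else decide ((c :: t).take 2 = ['s', 'h'])

def startsSheesh (l : List Char) : Bool :=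
  decide (l.take 4 = ['s', 'h', 'e', 'e']) && afterE (l.drop 4)

-- some suffix of l matches
def spec : List Char → Bool
  | [] => false
  | c :: t => startsSheesh (c :: t) || spec t

theorem afterE_replicate_append (k : Nat) (r : List Char) :
    afterE (List.replicate k 'e' ++ r) = afterE r := by
  induction k with
  | zero => simp
  | succ k ih => simpa [List.replicate_succ, afterE] using ih

theorem startsSheesh_false_of_head (c : Char) (t : List Char) (h : c ≠ 's') :
    startsSheesh (c :: t) = false := by
  simp [startsSheesh]
  intro he
  exact absurd he h

theorem spec_replicate_append (k : Nat) (r : List Char) :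
    spec (List.replicate k 'e' ++ r) = spec r := by
  induction k with
  | zero => simp
  | succ k ih =>
    rw [List.replicate_succ, List.cons_append, spec,
      startsSheesh_false_of_head 'e' _ (by decide), ih]
    simp

theorem replicate_e_cons2 (k : Nat) (hk : 2 ≤ k) :
    List.replicate k 'e' = 'e' :: 'e' :: List.replicate (k - 2) 'e' := by
  have hx : List.replicate ((k-2)+1+1) 'e' = 'e' :: 'e' :: List.replicate (k - 2) 'e' := by
    rw [List.replicate_succ, List.replicate_succ]
  rwa [show (k-2)+1+1 = k from by omega] at hx

theorem spec_sh_replicate (k : Nat) :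
    spec ('s' :: 'h' :: List.replicate k 'e') = false := by
  have h2 : spec (List.replicate k 'e') = false := by
    simpa using spec_replicate_append k []
  rw [spec, spec, startsSheesh_false_of_head 'h' _ (by decide), h2]
  simp only [Bool.or_false]
  rcases Nat.lt_or_ge k 2 with hk | hk
  · interval_cases k <;> decide
  · rw [replicate_e_cons2 k hk]
    have ha : afterE (List.replicate (k - 2) 'e') = false := by
      simpa using afterE_replicate_append (k-2) []
    simp [startsSheesh, ha]

theorem slice_nat' (msg : List Char) (j : Int) (m : Nat) (hj : 0 ≤ j) :
    PySem.List.slice msg (some j) (some (j + (m : Nat))) = (msg.drop j.toNat).take m := by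
  rw [PySem.List.slice_toNat msg (by omega) (by omega)]
  congr 1
  omega

theorem take2_of_take4 (l : List Char) (h : l.take 4 = ['s','h','e','e']) :
    l.take 2 = ['s','h'] := by
  have ht := congrArg (List.take 2) h
  rw [List.take_take] at ht
  norm_num at ht
  exact ht

-- ===== the A side: aLoop computes spec =====
-- Joint loop invariant for A's two states, by induction on the remaining length.
-- In the false state at loop variable i, the result is the match-anywhere predicate on the
-- still-unscanned suffix; in the true state, hEq records that positions p .. i of msg read
-- "sh" followed by at least two e's, and the result is the predicate from position p.
theorem A_main (n : Nat) : ∀ (msg : List Char) (i : Int),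
    ((msg.length : Int) - i).toNat ≤ n →
    ((-1 ≤ i → aLoop msg false i = spec (msg.drop (i + 1).toNat))
     ∧ (∀ p : Nat, 1 ≤ i → (p : Int) + 4 ≤ i + 1 →
          msg.drop p = 's' :: 'h' :: (List.replicate ((i + 1).toNat - p - 2) 'e'
            ++ msg.drop (i + 1).toNat) →
          aLoop msg true i = spec (msg.drop p))) := by
  induction n with
  | zero =>
    intro msg i hm
    constructor
    · intro hi
      rw [aLoop, dif_neg (by omega)]
      have hnil : msg.drop (i+1).toNat = [] := List.drop_eq_nil_of_le (by omega)
      simp [hnil, spec]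
    · intro p hp1 hp2 hEq
      rw [aLoop, dif_neg (by omega)]
      have hnil : msg.drop (i+1).toNat = [] := List.drop_eq_nil_of_le (by omega)
      rw [hnil] at hEq
      rw [hEq]
      simpa using (spec_sh_replicate _).symm
  | succ n ih =>
    intro msg i hm
    constructor
    -- ===== false state =====
    · intro hi
      rw [aLoop]
      by_cases hg : i < (msg.length : Int) - 1
      case neg =>
        rw [dif_neg hg]
        have hnil : msg.drop (i+1).toNat = [] := List.drop_eq_nil_of_le (by omega)
        simp [hnil, spec]
      case pos =>
        rw [dif_pos hg]
        rw [if_pos rfl]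
        have hj0 : 0 ≤ i + 1 := by omega
        have hjlt : (i+1).toNat < msg.length := by omega
        by_cases hs : PySem.List.slice msg (some (i+1)) (some (i+1+4)) = ['s','h','e','e']
        · rw [if_pos hs]
          have hs' : (msg.drop (i+1).toNat).take 4 = ['s','h','e','e'] := by
            have := slice_nat' msg (i+1) 4 hj0
            norm_num at this
            rwa [this] at hs
          have hslice : msg.drop (i+1).toNat
              = 's'::'h'::'e'::'e':: msg.drop ((i+1).toNat + 4) := by
            calc msg.drop (i+1).toNat
                = (msg.drop (i+1).toNat).take 4 ++ (msg.drop (i+1).toNat).drop 4 :=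
                  (List.take_append_drop 4 _).symm
              _ = ['s','h','e','e'] ++ msg.drop ((i+1).toNat + 4) := by
                  rw [hs', List.drop_drop]
              _ = _ := rfl
          have hres := (ih msg (i+1+3) (by omega)).2 (i+1).toNat (by omega) (by omega) ?_
          · rw [hres]
          · have e1 : (i+1+3+1).toNat = (i+1).toNat + 4 := by omega
            have e2 : (i+1).toNat + 4 - (i+1).toNat - 2 = 2 := by omega
            rw [e1, e2, hslice]
            rfl
        · rw [if_neg hs]
          rw [(ih msg (i+1) (by omega)).1 (by omega)]
          have h4 : (msg.drop (i+1).toNat).take 4 ≠ ['s','h','e','e'] := by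
            intro hc
            apply hs
            have := slice_nat' msg (i+1) 4 hj0
            norm_num at this
            rw [this, hc]
          have hdropc := List.drop_eq_getElem_cons hjlt
          have hss : startsSheesh (msg.drop (i+1).toNat) = false := by
            simp only [startsSheesh, Bool.and_eq_false_iff]
            left
            simpa using h4
          have e3 : (i+1+1).toNat = (i+1).toNat + 1 := by omega
          rw [e3]
          conv_rhs => rw [hdropc, spec]
          rw [hdropc] at hss
          rw [hss]
          simp
    -- ===== true state =====
    · intro p hp1 hp2 hEq
      rw [aLoop]
      by_cases hg : i < (msg.length : Int) - 1
      case neg =>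
        rw [dif_neg hg]
        have hnil : msg.drop (i+1).toNat = [] := List.drop_eq_nil_of_le (by omega)
        rw [hnil] at hEq
        rw [hEq]
        simpa using (spec_sh_replicate _).symm
      case pos =>
        rw [dif_pos hg, if_neg (by simp)]
        have hj0 : 0 ≤ i + 1 := by omega
        have hjlt : (i+1).toNat < msg.length := by omega
        set k : Nat := (i+1).toNat - p - 2 with hk
        have hk2 : 2 ≤ k := by omega
        have hdropc := List.drop_eq_getElem_cons hjlt
        by_cases hsh : PySem.List.slice msg (some (i+1)) (some (i+1+2)) = ['s','h']
        · rw [if_pos hsh]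
          have hsh' : (msg.drop (i+1).toNat).take 2 = ['s','h'] := by
            have := slice_nat' msg (i+1) 2 hj0
            norm_num at this
            rwa [this] at hsh
          have hfact : msg.drop (i+1).toNat = 's'::'h':: (msg.drop (i+1).toNat).drop 2 := by
            calc msg.drop (i+1).toNat
                = (msg.drop (i+1).toNat).take 2 ++ (msg.drop (i+1).toNat).drop 2 :=
                  (List.take_append_drop 2 _).symm
              _ = _ := by rw [hsh']; rfl
          symm
          rw [hEq, replicate_e_cons2 k hk2, hfact]
          rw [spec]
          have hstart : startsSheesh ('s' :: 'h' :: ('e' :: 'e' :: List.replicate (k - 2) 'e'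
              ++ 's' :: 'h' :: (msg.drop (i+1).toNat).drop 2)) = true := by
            simp [startsSheesh, afterE_replicate_append, afterE]
          rw [hstart]
          simp
        · rw [if_neg hsh]
          have hsh' : (msg.drop (i+1).toNat).take 2 ≠ ['s','h'] := by
            intro hc
            apply hsh
            have := slice_nat' msg (i+1) 2 hj0
            norm_num at this
            rw [this, hc]
          by_cases he : PySem.List.pyGet? msg (i+1) = some 'e'
          · rw [if_pos he]
            rw [PySem.List.pyGet?_eq_some_getElem msg hj0 (by omega)] at he
            have hchar : msg[(i+1).toNat] = 'e' := by simpa using he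
            rw [hchar] at hdropc
            refine (ih msg (i+1) (by omega)).2 p (by omega) (by omega) ?_
            rw [hdropc] at hEq
            have e4 : (i+1+1).toNat - p - 2 = k + 1 := by omega
            have e5 : (i+1+1).toNat = (i+1).toNat + 1 := by omega
            rw [e4, e5, hEq, List.replicate_succ']
            simp
          · rw [if_neg he]
            rw [(ih msg (i+1) (by omega)).1 (by omega)]
            have hchar : msg[(i+1).toNat] ≠ 'e' := by
              intro hc
              apply he
              rw [PySem.List.pyGet?_eq_some_getElem msg hj0 (by omega)]
              simp [hc]
            set c := msg[(i+1).toNat] with hc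
            set rest := msg.drop ((i+1).toNat + 1) with hr
            have e5 : (i+1+1).toNat = (i+1).toNat + 1 := by omega
            rw [e5, ← hr]
            rw [hdropc] at hEq hsh'
            -- hEq : msg.drop p = 's'::'h'::(replicate k 'e' ++ c :: rest)
            rw [hEq]
            have hA : startsSheesh ('s'::'h'::(List.replicate k 'e' ++ c :: rest)) = false := by
              rw [replicate_e_cons2 k hk2]
              simp only [List.cons_append, startsSheesh]
              simp [afterE_replicate_append, afterE, hchar]
              intro hcs h1
              apply hsh'
              simp [hcs, h1]
            have hC : startsSheesh (c :: rest) = false := by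
              simp only [startsSheesh, Bool.and_eq_false_iff]
              left
              simp only [decide_eq_false_iff_not]
              intro hc4
              exact hsh' (take2_of_take4 _ hc4)
            rw [spec, hA, spec, startsSheesh_false_of_head 'h' _ (by decide),
              spec_replicate_append, spec, hC]
            simp

-- ===== the B side: the anchored scan computes spec =====
theorem bERun_spec_aux (msg : List Char) : ∀ (n : Nat) (t : Int), 0 ≤ t →
    ((msg.length : Int) - t).toNat ≤ n →
    bERun msg t = t + ((msg.drop t.toNat).takeWhile (fun c => c = 'e')).length := by
  intro n
  induction n with
  | zero =>
    intro t ht hm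
    rw [bERun, dif_neg (by omega)]
    have : msg.drop t.toNat = [] := List.drop_eq_nil_of_le (by omega)
    simp [this]
  | succ n ih =>
    intro t ht hm
    rw [bERun]
    split
    case isTrue h =>
      obtain ⟨h1, h2⟩ := h
      have hlt : t.toNat < msg.length := by omega
      rw [PySem.List.pyGet?_eq_some_getElem msg ht (by omega)] at h2
      have hchar : msg[t.toNat] = 'e' := by simpa using h2
      have hdrop : msg.drop t.toNat = 'e' :: msg.drop (t.toNat + 1) := by
        rw [List.drop_eq_getElem_cons hlt, hchar]
      rw [ih (t+1) (by omega) (by omega)]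
      have e1 : (t + 1).toNat = t.toNat + 1 := by omega
      rw [e1, hdrop, List.takeWhile_cons]
      simp
      omega
    case isFalse h =>
      by_cases hl : (msg.length : Int) ≤ t
      · have : msg.drop t.toNat = [] := List.drop_eq_nil_of_le (by omega)
        simp [this]
      · have hlt : t.toNat < msg.length := by omega
        have hne : msg[t.toNat] ≠ 'e' := by
          intro hc
          exact h ⟨by omega, by rw [PySem.List.pyGet?_eq_some_getElem msg ht (by omega)]; simp [hc]⟩
        rw [List.drop_eq_getElem_cons hlt, List.takeWhile_cons]
        simp [hne]

theorem takeWhile_e_eq (l : List Char) :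
    l.takeWhile (fun c => c = 'e')
      = List.replicate (l.takeWhile (fun c => c = 'e')).length 'e' := by
  rw [List.eq_replicate_iff]
  exact ⟨rfl, fun b hb => by simpa using List.mem_takeWhile_imp hb⟩

theorem afterE_nohead (rest : List Char) (h : ∀ c t, rest = c :: t → c ≠ 'e') :
    afterE rest = decide (rest.take 2 = ['s', 'h']) := by
  cases rest with
  | nil => simp [afterE]
  | cons c t => simp [afterE, h c t rfl]

theorem bHit_eq_startsSheesh (msg : List Char) (i : Nat) :
    bHit msg (i : Int) = startsSheesh (msg.drop i) := by
  have h3 : PySem.List.slice msg (some (i : Int)) (some ((i : Int) + 3)) = (msg.drop i).take 3 := by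
    simpa using slice_nat' msg i 3 (by omega)
  by_cases hs : (msg.drop i).take 3 = ['s', 'h', 'e']
  case neg =>
    rw [bHit, if_neg (by rw [h3]; exact hs)]
    have h4 : (msg.drop i).take 4 ≠ ['s','h','e','e'] := by
      intro hc
      apply hs
      have ht := congrArg (List.take 3) hc
      rw [List.take_take] at ht
      norm_num at ht
      exact ht
    simp [startsSheesh, h4]
  case pos =>
    have hdec : msg.drop i = 's' :: 'h' :: 'e' :: msg.drop (i + 3) := by
      calc msg.drop i = (msg.drop i).take 3 ++ (msg.drop i).drop 3 := (List.take_append_drop 3 _).symm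
        _ = ['s','h','e'] ++ msg.drop (i + 3) := by rw [hs, List.drop_drop]
        _ = 's' :: 'h' :: 'e' :: msg.drop (i + 3) := rfl
    set l3 := msg.drop (i + 3) with hl3
    set m : Nat := (l3.takeWhile (fun c => c = 'e')).length with hm
    set rest := l3.dropWhile (fun c => c = 'e') with hrest
    have hsplit : l3 = List.replicate m 'e' ++ rest := by
      conv_lhs => rw [← List.takeWhile_append_dropWhile (p := fun c => c = 'e') (l := l3)]
      rw [← takeWhile_e_eq]
    have hrest_head : ∀ c t, rest = c :: t → c ≠ 'e' := by
      intro c t hct hce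
      have hh := List.head?_dropWhile_not (fun c => decide (c = 'e')) l3
      rw [← hrest, hct] at hh
      simp [hce] at hh
    have hrun : bERun msg ((i : Int) + 3) = (i : Int) + 3 + m := by
      rw [bERun_spec_aux msg ((msg.length : Int) - ((i:Int)+3)).toNat _ (by omega) (by omega)]
      rw [show ((i:Int) + 3).toNat = i + 3 from by omega, ← hl3, ← hm]
    have hslice2 : PySem.List.slice msg (some ((i:Int) + 3 + m)) (some ((i:Int) + 3 + m + 2))
        = rest.take 2 := by
      have h1 := slice_nat' msg ((i + 3 + m : Nat) : Int) 2 (by omega)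
      have e1 : ((i + 3 + m : Nat) : Int) = (i:Int) + 3 + m := by push_cast; ring
      have e2 : ((i + 3 + m : Nat) : Int) + ((2:Nat):Int) = (i:Int) + 3 + m + 2 := by push_cast; ring
      rw [e2, e1] at h1
      rw [h1]
      have hd : msg.drop ((((i:Int) + 3 + (m:Int))).toNat) = rest := by
        rw [show (((i:Int) + 3 + (m:Int))).toNat = (i + 3) + m from by omega,
          ← List.drop_drop, ← hl3, hsplit, List.drop_left' (by simp)]
      rw [hd]
    rw [bHit, if_pos (by rw [h3]; exact hs)]
    simp only [hrun, hslice2]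
    rw [startsSheesh, hdec]
    rcases Nat.eq_zero_or_pos m with hm0 | hmpos
    · have hl3r : l3 = rest := by rw [hsplit, hm0]; simp
      have hnot : l3.take 1 ≠ ['e'] := by
        rcases hr : rest with _ | ⟨c, t⟩
        · simp [hl3r, hr]
        · have := hrest_head c t hr
          simp [hl3r, hr, this]
      simp [hm0, hnot]
    · have hrepc : List.replicate m 'e' = 'e' :: List.replicate (m - 1) 'e' := by
        have hx := List.replicate_succ (n := m - 1) (a := 'e')
        rwa [show (m-1)+1 = m from by omega] at hx
      have hl3c : l3 = 'e' :: (List.replicate (m - 1) 'e' ++ rest) := by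
        rw [hsplit, hrepc]; rfl
      rw [hl3c]
      simp [afterE_replicate_append, afterE_nohead rest hrest_head]
      omega

theorem any_range_eq_spec (l : List Char) :
    (List.range l.length).any (fun k => startsSheesh (l.drop k)) = spec l := by
  induction l with
  | nil => simp [spec]
  | cons c t ih =>
    rw [List.length_cons, List.range_succ_eq_map]
    simp only [List.any_cons, List.any_map]
    rw [spec, ← ih]
    simp [Function.comp_def]

theorem alt_eq_spec (msg : List Char) :
    (PySem.List.pyRange 0 (msg.length : Int) 1).any (fun i => bHit msg i) = spec msg := by
  rw [PySem.List.pyRange_one, List.any_map]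
  have hr : ((msg.length : Int) - 0).toNat = msg.length := by omega
  rw [hr, ← any_range_eq_spec msg]
  exact List.any_congr rfl (fun k => by simpa using bHit_eq_startsSheesh msg k)

-- ===== VERDICT (by name: the statement is the Claim_ definition above) =====
theorem is_sheesh_spec : Claim_equal_is_sheesh := by
  intro msg_ref _
  unfold Spec_is_sheesh is_sheesh is_sheesh_alt
  rw [alt_eq_spec]
  have h := (A_main ((((PySem.Chars.lower msg_ref.toList).length : Int) + 1).toNat)
    (PySem.Chars.lower msg_ref.toList) (-1) (by omega)).1 (by omega)
  simpa using h
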